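-- pv_equiv track=rewrite | github.com/Kasl0/WDI | Kolokwium 1/1B&2B.py | zamiana
-- ===== SOURCE A (Python) =====
-- def zamiana(n):
--     dlugosc = 0
--     tmp=n
--
--     while n > 0:
--         dlugosc += 1
--         n //= 4
--
--     n=tmp
--     tab=[0 for i in range (dlugosc)]
--
--     for i in range (dlugosc):
--         tab[i] = n % 4
--         n //= 4
--
--     liczba = 0
--     tab=tab[::-1]
--     for i in range(len(tab)):
--         liczba *= 10
--         liczba += tab[i]
--
--     return liczba
-- ===== SOURCE B (Python) =====
-- def zamiana(n):
--     liczba = 0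
--     mult = 1
--     while n > 0:
--         liczba += (n % 4) * mult
--         mult *= 10
--         n //= 4
--     return liczba
-- ===== Notes on version B (the rewrite author's own statement) =====
-- stated objective: simpler
-- what changed: Single while-loop accumulating the decimal result with a running place-value multiplier, replacing A's three passes (length-count loop, digit table fill, reversal + fold).
import Mathlib
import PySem

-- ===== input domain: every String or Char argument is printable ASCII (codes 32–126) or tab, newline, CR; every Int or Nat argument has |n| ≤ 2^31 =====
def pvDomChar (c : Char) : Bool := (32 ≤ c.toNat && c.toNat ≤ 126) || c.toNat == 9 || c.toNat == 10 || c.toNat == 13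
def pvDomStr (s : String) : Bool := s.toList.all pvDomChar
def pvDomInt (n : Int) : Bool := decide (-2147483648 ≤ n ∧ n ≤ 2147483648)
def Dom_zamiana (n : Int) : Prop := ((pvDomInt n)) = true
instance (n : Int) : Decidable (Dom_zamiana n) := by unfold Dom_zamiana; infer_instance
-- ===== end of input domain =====

-- B replaces A's three passes (length count, digit table, reversal + fold) by ONE
-- while-loop accumulating the decimal result with a running multiplier: simpler.

-- termination measure lemma for the while-loops (cited by decreasing_by)
theorem pvFdiv4_lt (n : Int) (h : 0 < n) :
    (PySem.Int.floordiv n 4).toNat < n.toNat := by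
  rw [PySem.Int.floordiv_eq_ediv_of_pos (by omega)]
  omega

-- ===== PORT A =====
-- while n > 0: dlugosc += 1; n //= 4
def zamianaLen (n : Int) : Nat :=
  if h : 0 < n then zamianaLen (PySem.Int.floordiv n 4) + 1 else 0
termination_by n.toNat
decreasing_by exact pvFdiv4_lt n h

-- for i in range(dlugosc): tab[i] = n % 4; n //= 4
def zamianaTab (n : Int) : Nat → List Int
  | 0 => []
  | k + 1 => PySem.Int.mod n 4 :: zamianaTab (PySem.Int.floordiv n 4) k

def zamiana (n : Int) : Int :=
  let dlugosc := zamianaLen n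
  let tab := zamianaTab n dlugosc
  let tab := tab.reverse                              -- tab = tab[::-1]
  tab.foldl (fun liczba d => liczba * 10 + d) 0       -- liczba *= 10; liczba += tab[i]

-- ===== PORT B =====
-- liczba = 0; mult = 1; while n > 0: liczba += (n%4)*mult; mult *= 10; n //= 4
def zamianaAltGo (n mult liczba : Int) : Int :=
  if h : 0 < n then
    zamianaAltGo (PySem.Int.floordiv n 4) (mult * 10) (liczba + PySem.Int.mod n 4 * mult)
  else liczba
termination_by n.toNat
decreasing_by exact pvFdiv4_lt n h

def zamiana_alt (n : Int) : Int := zamianaAltGo n 1 0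

-- ===== PRECONDITION & SPEC =====
def Spec_zamiana (n : Int) (out : Int) : Prop := out = zamiana_alt n
instance (n : Int) (out : Int) : Decidable (Spec_zamiana n out) := by unfold Spec_zamiana; infer_instance

-- ===== CLAIM (what is proved, stated in full; the proofs are below) =====
def Claim_equal_zamiana : Prop := ∀ (n : Int), Dom_zamiana n → Spec_zamiana n (zamiana n)

-- ===== LEMMAS AND PROOFS =====

theorem foldl_dec_append (l : List Int) (d a : Int) :
    (l ++ [d]).foldl (fun liczba x => liczba * 10 + x) a
      = (l.foldl (fun liczba x => liczba * 10 + x) a) * 10 + d := by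
  simp [List.foldl_append]

theorem zamianaAltGo_acc (k : Nat) : ∀ (n : Int), n.toNat = k → ∀ (mult liczba : Int),
    zamianaAltGo n mult liczba = liczba + mult * zamianaAltGo n 1 0 := by
  induction k using Nat.strong_induction_on with
  | _ k ih =>
    intro n hk mult liczba
    rw [zamianaAltGo]
    conv_rhs => rw [zamianaAltGo]
    split_ifs with h
    · have hlt := pvFdiv4_lt n h
      rw [ih _ (hk ▸ hlt) _ rfl (mult * 10) (liczba + PySem.Int.mod n 4 * mult),
        ih _ (hk ▸ hlt) _ rfl (1 * 10) (0 + PySem.Int.mod n 4 * 1)]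
      ring
    · ring

theorem zamiana_eq_alt (k : Nat) : ∀ (n : Int), n.toNat = k → zamiana n = zamiana_alt n := by
  induction k using Nat.strong_induction_on with
  | _ k ih =>
    intro n hk
    unfold zamiana zamiana_alt
    rw [zamianaLen, zamianaAltGo]
    split_ifs with h
    · have hlt := pvFdiv4_lt n h
      have hrec := ih _ (hk ▸ hlt) (PySem.Int.floordiv n 4) rfl
      unfold zamiana zamiana_alt at hrec
      simp only [zamianaTab, List.reverse_cons, foldl_dec_append]
      rw [hrec]
      conv_rhs => rw [zamianaAltGo_acc (PySem.Int.floordiv n 4).toNat _ rfl (1 * 10)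
        (0 + PySem.Int.mod n 4 * 1)]
      ring
    · simp [zamianaTab]

-- ===== VERDICT (by name: the statement is the Claim_ definition above) =====
theorem zamiana_spec : Claim_equal_zamiana := by
  intro n _
  exact zamiana_eq_alt n.toNat n rfl
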